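-- pv_equiv track=rewrite | github.com/maxpurrp/http_translator | server.py | _check_word_of_sentence
-- ===== SOURCE A (Python) =====
-- def _check_word_of_sentence(text):
--     if text == "":
--         return False
--     else:
--         update = text.split()
--         for elem in update:
--             for i in range(len(elem)-1):
--                 if elem[i].isalpha() and elem[i+1].isnumeric() or elem[i+1].isalpha() and elem[i].isnumeric():
--                     return True
--         return False
-- ===== SOURCE B (Python) =====
-- def _check_word_of_sentence(text):
--     return any((a.isalpha() and b.isnumeric()) or (b.isalpha() and a.isnumeric())
--                for a, b in zip(text, text[1:]))
-- ===== Notes on version B (the rewrite author's own statement) =====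
-- stated objective: simpler
-- what changed: Drops the split()-into-words pass and the index-based inner loop: B scans the raw string once over adjacent character pairs (zip(text, text[1:])), valid because whitespace is neither alpha nor numeric so no pair across a word boundary can match.
import Mathlib
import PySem

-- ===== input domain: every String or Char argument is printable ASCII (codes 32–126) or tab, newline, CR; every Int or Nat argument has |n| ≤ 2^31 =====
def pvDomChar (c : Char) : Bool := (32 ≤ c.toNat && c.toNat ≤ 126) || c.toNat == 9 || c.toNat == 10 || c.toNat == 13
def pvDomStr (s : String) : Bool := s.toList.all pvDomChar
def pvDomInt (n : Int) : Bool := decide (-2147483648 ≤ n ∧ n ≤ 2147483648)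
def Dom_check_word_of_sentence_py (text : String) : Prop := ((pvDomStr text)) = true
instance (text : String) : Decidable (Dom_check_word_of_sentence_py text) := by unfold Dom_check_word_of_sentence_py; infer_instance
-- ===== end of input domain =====

-- B drops the word-splitting pass and scans the raw string once over adjacent character
-- pairs; whitespace is neither alpha nor numeric, so no cross-word pair can match.

-- shared by both ports: the pair test 'a.isalpha() and b.isnumeric() or b.isalpha() and a.isnumeric()';
-- on the ASCII domain Dom_ a single char's isnumeric() coincides with isdigit, so PySem.Chars.isdigit is exact here.
def pvPair (a b : Char) : Bool :=
  (PySem.Chars.isalpha a && PySem.Chars.isdigit b) ||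
  (PySem.Chars.isalpha b && PySem.Chars.isdigit a)

-- ===== PORT A =====
-- inner loop 'for i in range(len(elem)-1): if <pair test>: return True' (indices always in range, getD default unused)
def pvWordHitA (cs : List Char) : Bool :=
  (List.range (cs.length - 1)).any fun i => pvPair (cs.getD i ' ') (cs.getD (i + 1) ' ')

def check_word_of_sentence_py (text : String) : Bool :=
  if text == "" then false
  else (PySem.Chars.split₀ text.toList).any fun elem => pvWordHitA elem

-- ===== PORT B =====
-- 'any(<pair test> for a, b in zip(text, text[1:]))'
def check_word_of_sentence_py_alt (text : String) : Bool :=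
  (text.toList.zip (PySem.Str.slice text (some 1) none).toList).any fun p => pvPair p.1 p.2

-- ===== PRECONDITION & SPEC =====
def Spec_check_word_of_sentence_py (text : String) (out : Bool) : Prop := out = check_word_of_sentence_py_alt text
instance (text : String) (out : Bool) : Decidable (Spec_check_word_of_sentence_py text out) := by unfold Spec_check_word_of_sentence_py; infer_instance

-- ===== CLAIM (what is proved, stated in full; the proofs are below) =====
def Claim_equal_check_word_of_sentence_py : Prop := ∀ (text : String), Dom_check_word_of_sentence_py text → Spec_check_word_of_sentence_py text (check_word_of_sentence_py text)

-- ===== LEMMAS AND PROOFS =====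

-- the common reference form: some adjacent pair of the character list matches
def pvHasAdj (cs : List Char) : Bool := (cs.zip cs.tail).any fun p => pvPair p.1 p.2

theorem pv_space_not_alnum {c : Char} (h : PySem.Chars.isspace c = true) :
    PySem.Chars.isalpha c = false ∧ PySem.Chars.isdigit c = false := by
  have e1 : ('A').val.toNat = 65 := by decide
  have e2 : ('Z').val.toNat = 90 := by decide
  have e3 : ('a').val.toNat = 97 := by decide
  have e4 : ('z').val.toNat = 122 := by decide
  have e5 : ('0').val.toNat = 48 := by decide
  have e6 : ('9').val.toNat = 57 := by decide
  simp only [PySem.Chars.isspace, PySem.Chars.isalpha, PySem.Chars.isupper, PySem.Chars.islower,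
    PySem.Chars.isdigit, Char.le_def, UInt32.le_iff_toNat_le, Char.toNat, Bool.or_eq_true,
    Bool.and_eq_true, decide_eq_true_eq, Bool.or_eq_false_iff, Bool.and_eq_false_iff,
    decide_eq_false_iff_not, not_le, e1, e2, e3, e4, e5, e6] at h ⊢
  omega

theorem pvPair_space_left {c d : Char} (h : PySem.Chars.isspace c = true) : pvPair c d = false := by
  obtain ⟨h1, h2⟩ := pv_space_not_alnum h
  simp [pvPair, h1, h2]

theorem pvPair_space_right {c d : Char} (h : PySem.Chars.isspace c = true) : pvPair d c = false := by
  obtain ⟨h1, h2⟩ := pv_space_not_alnum h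
  simp [pvPair, h1, h2]

theorem pvHasAdj_cons₂ (a b : Char) (t : List Char) :
    pvHasAdj (a :: b :: t) = (pvPair a b || pvHasAdj (b :: t)) := by
  simp [pvHasAdj]

theorem pvHasAdj_cons_space {c : Char} (h : PySem.Chars.isspace c = true) (rest : List Char) :
    pvHasAdj (c :: rest) = pvHasAdj rest := by
  cases rest with
  | nil => simp [pvHasAdj]
  | cons d t => rw [pvHasAdj_cons₂, pvPair_space_left h, Bool.false_or]

theorem pvHasAdj_append_space (w : List Char) {c : Char} (h : PySem.Chars.isspace c = true)
    (rest : List Char) : pvHasAdj (w ++ c :: rest) = (pvHasAdj w || pvHasAdj rest) := by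
  induction w with
  | nil => rw [List.nil_append, pvHasAdj_cons_space h]; simp [pvHasAdj]
  | cons a w ih =>
    cases w with
    | nil =>
      simp only [List.nil_append, List.cons_append]
      rw [pvHasAdj_cons₂, pvPair_space_right h, pvHasAdj_cons_space h]
      simp [pvHasAdj]
    | cons b t =>
      simp only [List.cons_append] at ih ⊢
      rw [pvHasAdj_cons₂, ih, pvHasAdj_cons₂, Bool.or_assoc]

theorem pvWordHitA_eq (cs : List Char) : pvWordHitA cs = pvHasAdj cs := by
  induction cs with
  | nil => simp [pvWordHitA, pvHasAdj]
  | cons a t ih =>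
    cases t with
    | nil => simp [pvWordHitA, pvHasAdj]
    | cons b t =>
      rw [pvHasAdj_cons₂, ← ih]
      simp only [pvWordHitA, List.length_cons, Nat.add_sub_cancel, List.range_succ_eq_map,
        List.any_cons, List.any_map]
      simp [Function.comp_def, List.getD]

theorem pv_go_spec (s cur : List Char) (acc : List (List Char)) :
    ((PySem.Chars.split₀.go s cur acc).any pvHasAdj)
      = (acc.any pvHasAdj || pvHasAdj (cur.reverse ++ s)) := by
  induction s generalizing cur acc with
  | nil =>
    cases cur with
    | nil => simp [PySem.Chars.split₀.go, pvHasAdj]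
    | cons x xs =>
      simp [PySem.Chars.split₀.go, Bool.or_comm]
  | cons c rest ih =>
    by_cases hs : PySem.Chars.isspace c = true
    · cases cur with
      | nil =>
        rw [show PySem.Chars.split₀.go (c :: rest) [] acc = PySem.Chars.split₀.go rest [] acc by
              simp [PySem.Chars.split₀.go, hs], ih]
        simp [pvHasAdj_cons_space hs]
      | cons x xs =>
        rw [show PySem.Chars.split₀.go (c :: rest) (x :: xs) acc
              = PySem.Chars.split₀.go rest [] ((x :: xs).reverse :: acc) by
              simp [PySem.Chars.split₀.go, hs], ih]
        rw [List.reverse_nil, List.nil_append, List.any_cons,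
          pvHasAdj_append_space _ hs]
        cases acc.any pvHasAdj <;> cases pvHasAdj (x :: xs).reverse <;>
          cases pvHasAdj rest <;> rfl
    · rw [show PySem.Chars.split₀.go (c :: rest) cur acc
            = PySem.Chars.split₀.go rest (c :: cur) acc by
            simp [PySem.Chars.split₀.go, hs], ih]
      simp [List.append_assoc]

theorem pv_split₀_any (cs : List Char) :
    ((PySem.Chars.split₀ cs).any pvHasAdj) = pvHasAdj cs := by
  rw [PySem.Chars.split₀, pv_go_spec]
  simp

theorem pv_alt_eq (text : String) : check_word_of_sentence_py_alt text = pvHasAdj text.toList := by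
  unfold check_word_of_sentence_py_alt pvHasAdj
  rw [PySem.Str.toList_slice, PySem.Chars.slice_eq_listSlice,
    PySem.List.slice_from _ (by norm_num : (0:Int) ≤ 1)]
  simp [List.drop_one]

-- ===== VERDICT (by name: the statement is the Claim_ definition above) =====
theorem check_word_of_sentence_py_spec : Claim_equal_check_word_of_sentence_py := by
  intro text _
  unfold Spec_check_word_of_sentence_py check_word_of_sentence_py
  rw [pv_alt_eq]
  by_cases h : text = ""
  · subst h; simp [pvHasAdj]
  · simp only [beq_iff_eq, h, if_false]
    simp only [pvWordHitA_eq]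
    exact pv_split₀_any _
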